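-- pv_equiv track=rewrite | github.com/cravo123/LeetCode | Algorithms/0816 Ambiguous Coordinates.py | generate
-- ===== SOURCE A (Python) =====
-- def generate(num: str):
--     if len(num) == 1:
--         return [num]
--
--     if not num or num[0] == num[-1] == '0':
--         return []
--
--     if num[-1] == '0':
--         return [num]
--
--     if num[0] == '0':
--         return [num[0] + '.' + num[1:]]
--
--     res = [num]
--     for i in range(1, len(num)):
--         res.append(num[:i] + '.' + num[i:])
--
--     return res
-- ===== SOURCE B (Python) =====
-- def generate(num: str):
--     # generate-and-filter: one pass over all candidate renderings
--     if not num: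
--         return []
--     res = []
--     if len(num) == 1 or num[0] != '0':
--         res.append(num)
--     for i in range(1, len(num)):
--         left, right = num[:i], num[i:]
--         if (len(left) == 1 or left[0] != '0') and right[-1] != '0':
--             res.append(left + '.' + right)
--     return res
-- ===== Notes on version B (the rewrite author's own statement) =====
-- stated objective: simpler
-- what changed: Replaces A's four-way special-case analysis (len 1, both-ends zero, trailing zero, leading zero) by a single generate-and-filter pass: every candidate split is emitted iff its integer part has length 1 or no leading '0' and its fraction part has no trailing '0'.
import Mathlib
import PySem

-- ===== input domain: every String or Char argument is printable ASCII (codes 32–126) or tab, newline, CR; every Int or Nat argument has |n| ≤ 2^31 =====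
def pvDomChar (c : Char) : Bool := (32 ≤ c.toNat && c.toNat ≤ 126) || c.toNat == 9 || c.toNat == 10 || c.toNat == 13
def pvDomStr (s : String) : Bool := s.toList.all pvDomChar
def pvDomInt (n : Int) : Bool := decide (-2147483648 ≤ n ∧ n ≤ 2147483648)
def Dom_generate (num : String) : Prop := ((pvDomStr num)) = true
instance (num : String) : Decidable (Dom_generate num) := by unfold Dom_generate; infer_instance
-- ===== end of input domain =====

-- B replaces A's four-way special-case analysis by one generate-and-filter pass (objective: simpler).

-- ===== PORT A =====
def generate (num : String) : List String :=
  let s := num.toList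
  if s.length = 1 then [num]
  else if s.length = 0 ∨ (PySem.List.pyGet? s 0 = PySem.List.pyGet? s (-1) ∧ PySem.List.pyGet? s (-1) = some '0') then []
  else if PySem.List.pyGet? s (-1) = some '0' then [num]
  else if PySem.List.pyGet? s 0 = some '0' then
    -- num[0] + '.' + num[1:]; this branch is only reached with s ≠ [], so num[0] is the one-element prefix s.take 1
    [String.ofList (s.take 1 ++ '.' :: PySem.List.slice s (some 1) none)]
  else
    (PySem.List.pyRange 1 (s.length : Int) 1).foldl
      (fun res i =>
        res ++ [String.ofList (PySem.List.slice s none (some i) ++ '.' :: PySem.List.slice s (some i) none)])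
      [num]

-- ===== PORT B =====
-- valid integer part: length 1 or no leading '0'
def pvOkInt (s : List Char) : Bool := decide (s.length = 1 ∨ PySem.List.pyGet? s 0 ≠ some '0')
-- valid fraction part: no trailing '0'
def pvOkFrac (s : List Char) : Bool := decide (PySem.List.pyGet? s (-1) ≠ some '0')

def generate_alt (num : String) : List String :=
  let s := num.toList
  if s.length = 0 then []
  else
    (PySem.List.pyRange 1 (s.length : Int) 1).foldl
      (fun res i =>
        let left := PySem.List.slice s none (some i)
        let right := PySem.List.slice s (some i) none
        if pvOkInt left && pvOkFrac right then
          res ++ [String.ofList (left ++ '.' :: right)]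
        else res)
      (if pvOkInt s then [num] else [])

-- ===== PRECONDITION & SPEC =====
def Spec_generate (num : String) (out : List String) : Prop := out = generate_alt num
instance (num : String) (out : List String) : Decidable (Spec_generate num out) := by unfold Spec_generate; infer_instance

-- ===== CLAIM (what is proved, stated in full; the proofs are below) =====
def Claim_equal_generate : Prop := ∀ (num : String), Dom_generate num → Spec_generate num (generate num)

-- ===== LEMMAS AND PROOFS =====

lemma pv_getLast?_drop (s : List Char) : ∀ (n : Nat), n < s.length → (s.drop n).getLast? = s.getLast? := by
  induction s with
  | nil => intro n h; simp at h
  | cons x xs ih =>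
    intro n h
    cases n with
    | zero => simp
    | succ m =>
      simp only [List.drop_succ_cons]
      rw [ih m (by simpa using h)]
      cases xs with
      | nil => simp at h
      | cons y ys => simp [List.getLast?_cons_cons]

lemma pv_getLast?_some (b : Char) (t : List Char) : ∃ z, (b :: t).getLast? = some z := by
  induction t generalizing b with
  | nil => exact ⟨b, rfl⟩
  | cons c t ih => simpa [List.getLast?_cons_cons] using ih c

lemma pv_take_head (a : Char) (r : List Char) (n : Nat) (h : 0 < n) :
    ((a :: r).take n)[0]? = some a := by
  cases n with
  | zero => omega
  | succ m => simp [List.take_succ_cons]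

lemma pv_flatten_map_singleton {α β : Type} (f : α → β) (l : List α) :
    (l.map (fun x => [f x])).flatten = l.map f := by
  induction l with
  | nil => rfl
  | cons x xs ih => simp [ih]

-- the filter/map normal form of B's loop
lemma pv_alt_eq (num : String) (s : List Char) (h : num.toList = s) (hne : s ≠ []) :
    generate_alt num =
      (if pvOkInt s then [num] else []) ++
      ((PySem.List.pyRange 1 (s.length : Int) 1).filter
        (fun i => pvOkInt (PySem.List.slice s none (some i)) && pvOkFrac (PySem.List.slice s (some i) none))).map
        (fun i => String.ofList (PySem.List.slice s none (some i) ++ '.' :: PySem.List.slice s (some i) none)) := by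
  have hlen : s.length ≠ 0 := by simpa [List.length_eq_zero_iff] using hne
  simp only [generate_alt, h]
  rw [if_neg hlen, PySem.List.foldl_append_if]

theorem generate_spec : Claim_equal_generate := by
  intro num _
  show generate num = generate_alt num
  rcases hlc : num.toList with _ | ⟨a, _ | ⟨b, t⟩⟩
  · -- empty string
    simp [generate, generate_alt, hlc]
  · -- single character
    simp [generate, generate_alt, hlc, pvOkInt, PySem.List.pyRange_one_eq_nil]
  · -- length ≥ 2
    obtain ⟨z, hzr⟩ := pv_getLast?_some b t
    have hz : (a :: b :: t).getLast? = some z := by simpa [List.getLast?_cons_cons] using hzr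
    rw [pv_alt_eq num _ hlc (by simp)]
    -- the fraction part of any split keeps the last character of the input
    have hfrac : ∀ i : Int, 1 ≤ i → i < ((a :: b :: t).length : Int) →
        pvOkFrac (PySem.List.slice (a :: b :: t) (some i) none) = decide (z ≠ '0') := by
      intro i h1 h2
      have e1 : PySem.List.slice (a :: b :: t) (some i) none = (a :: b :: t).drop i.toNat :=
        PySem.List.slice_from _ (by omega)
      rw [e1]
      have hlt : i.toNat < (a :: b :: t).length := by
        simp only [List.length_cons] at h2 ⊢; omega
      simp [pvOkFrac, PySem.List.pyGet?_neg_one, pv_getLast?_drop _ _ hlt, hz]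
    -- the integer part of any split at i ≥ 2 keeps the first character of the input
    have hint : ∀ i : Int, 2 ≤ i → i < ((a :: b :: t).length : Int) →
        pvOkInt (PySem.List.slice (a :: b :: t) none (some i)) = decide (a ≠ '0') := by
      intro i h1 h2
      have e1 : PySem.List.slice (a :: b :: t) none (some i) = (a :: b :: t).take i.toNat :=
        PySem.List.slice_to _ (by omega)
      rw [e1]
      have hlt : i.toNat < (a :: b :: t).length := by
        simp only [List.length_cons] at h2 ⊢; omega
      simp [pvOkInt, PySem.List.pyGet?_zero, pv_take_head a (b :: t) i.toNat (by omega),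
        List.length_take]
      intro hmin
      exact absurd hmin (by omega)
    by_cases hzz : z = '0'
    · -- fraction always ends in '0': every split is filtered out, A keeps at most the whole string
      subst hzz
      have hnil : ((PySem.List.pyRange 1 ((a :: b :: t).length : Int) 1).filter
          (fun i => pvOkInt (PySem.List.slice (a :: b :: t) none (some i)) &&
            pvOkFrac (PySem.List.slice (a :: b :: t) (some i) none))) = [] := by
        rw [List.filter_eq_nil_iff]
        intro i hi
        rw [PySem.List.mem_pyRange_one] at hi
        simp [hfrac i hi.1 hi.2]
      rw [hnil]
      by_cases ha : a = '0'
      · -- A: both ends '0' → []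
        subst ha
        simp [generate, hlc, PySem.List.pyGet?_zero_cons, PySem.List.pyGet?_neg_one, hzr, pvOkInt]
      · -- A: trailing '0' only → [num]
        simp [generate, hlc, PySem.List.pyGet?_zero_cons, PySem.List.pyGet?_neg_one, hzr, ha,
          pvOkInt]
    · have hzz' : ¬ (('0' : Char) = z) := fun h => hzz h.symm
      have hone : (pvOkInt (PySem.List.slice (a :: b :: t) none (some 1)) &&
          pvOkFrac (PySem.List.slice (a :: b :: t) (some 1) none)) = true := by
        have e1 : PySem.List.slice (a :: b :: t) none (some 1) = (a :: b :: t).take (1 : Int).toNat :=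
          PySem.List.slice_to _ (by omega)
        have e2 : PySem.List.slice (a :: b :: t) (some 1) none = (a :: b :: t).drop (1 : Int).toNat :=
          PySem.List.slice_from _ (by omega)
        rw [e1, e2]
        simp [pvOkInt, pvOkFrac, PySem.List.pyGet?_neg_one, hzr, hzz]
      by_cases ha : a = '0'
      · -- A: leading '0' only → ['0.rest']; B keeps exactly the i = 1 split
        subst ha
        have hcons : PySem.List.pyRange 1 (((('0' : Char) :: b :: t)).length : Int) 1 =
            1 :: PySem.List.pyRange 2 ((('0' : Char) :: b :: t).length : Int) 1 := by
          have := PySem.List.pyRange_one_cons (a := 1) (b := ((('0' : Char) :: b :: t).length : Int))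
            (by simp only [List.length_cons]; omega)
          simpa using this
        have hrest : ((PySem.List.pyRange 2 ((('0' : Char) :: b :: t).length : Int) 1).filter
            (fun i => pvOkInt (PySem.List.slice (('0' : Char) :: b :: t) none (some i)) &&
              pvOkFrac (PySem.List.slice (('0' : Char) :: b :: t) (some i) none))) = [] := by
          rw [List.filter_eq_nil_iff]
          intro i hi
          rw [PySem.List.mem_pyRange_one] at hi
          simp [hint i hi.1 hi.2]
        rw [hcons, List.filter_cons]
        simp only [hone, if_true, hrest, List.map_cons, List.map_nil]
        have htake : PySem.List.slice (('0' : Char) :: b :: t) none (some 1) =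
            (('0' : Char) :: b :: t).take (1 : Int).toNat :=
          PySem.List.slice_to _ (by omega)
        simp [generate, hlc, PySem.List.pyGet?_zero_cons, PySem.List.pyGet?_neg_one, hzr, hzz,
          hzz', pvOkInt, htake]
      · -- generic case: every split is kept
        have hall : ((PySem.List.pyRange 1 ((a :: b :: t).length : Int) 1).filter
            (fun i => pvOkInt (PySem.List.slice (a :: b :: t) none (some i)) &&
              pvOkFrac (PySem.List.slice (a :: b :: t) (some i) none))) =
            PySem.List.pyRange 1 ((a :: b :: t).length : Int) 1 := by
          rw [List.filter_eq_self]
          intro i hi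
          rw [PySem.List.mem_pyRange_one] at hi
          rcases eq_or_lt_of_le hi.1 with h1 | h1
          · rw [← h1]; exact hone
          · simp [hint i (by omega) hi.2, hfrac i hi.1 hi.2, ha, hzz]
        rw [hall]
        simp [generate, hlc, PySem.List.pyGet?_zero_cons, PySem.List.pyGet?_neg_one, hzr, hzz,
          ha, pvOkInt, pv_flatten_map_singleton]
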